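-- pv_equiv track=rewrite | github.com/ktchow1/hackerrank | walk along num line (Flow Traders).py | num_walk_along_num_line1
-- ===== SOURCE A (Python) =====
-- def is_reachable(s, n0, n1, N) :
--     pos = n0
--     for c in s :
--         if c == 'l' :
--             pos = pos-1
--             if pos < 0 : return False
--         else :
--             pos = pos+1
--             if pos > N : return False
--     if pos == n1 : return True
--     else : return False
--
-- def find_substr(command, substrs) :
--     if len(command) == 0 : return
--
--     temp = set()
--     find_substr(command[1:], temp)
--
--     for s in temp :
--         substrs.add(s)
--         substrs.add(command[0]+s)
--     substrs.add(command[0:1]) # Dont forget this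
--
-- def num_walk_along_num_line1(command, n0, n1, N) :
--     substrs = set()
--     find_substr(command, substrs)
--
--     count = 0
--     for s in substrs :
--         if is_reachable(s, n0, n1, N) :
--             count = count + 1
--     return count
-- ===== SOURCE B (Python) =====
-- def num_walk_along_num_line1(command, n0, n1, N):
--     # DP: total[p] = number of distinct nonempty subsequences of the processed
--     # prefix that walk from n0 staying legal and end at position p;
--     # last[c] = that count restricted to subsequences ending in character c,
--     # as of the previous occurrence of c (classic distinct-subsequence dedup).
--     total = {}
--     last = {}
--     for c in command:
--         delta = -1 if c == 'l' else 1
--         new_c = {}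
--         for p, cnt in total.items():
--             q = p + delta
--             if (q < 0) if delta == -1 else (q > N):
--                 continue
--             new_c[q] = new_c.get(q, 0) + cnt
--         q0 = n0 + delta
--         if not ((q0 < 0) if delta == -1 else (q0 > N)):
--             new_c[q0] = new_c.get(q0, 0) + 1
--         old_c = last.get(c, {})
--         for p, cnt in new_c.items():
--             total[p] = total.get(p, 0) + cnt
--         for p, cnt in old_c.items():
--             total[p] = total.get(p, 0) - cnt
--         last[c] = new_c
--     return total.get(n1, 0)
-- ===== Notes on version B (the rewrite author's own statement) =====
-- stated objective: faster
-- what changed: Replaces the exponential enumeration of all distinct subsequences (recursive power-set build, then a reachability test per subsequence) by a one-pass dynamic program over dictionaries counting, per end position, the distinct valid subsequences, with the classic last-occurrence subtraction to deduplicate equal subsequence strings.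
import Mathlib
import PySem

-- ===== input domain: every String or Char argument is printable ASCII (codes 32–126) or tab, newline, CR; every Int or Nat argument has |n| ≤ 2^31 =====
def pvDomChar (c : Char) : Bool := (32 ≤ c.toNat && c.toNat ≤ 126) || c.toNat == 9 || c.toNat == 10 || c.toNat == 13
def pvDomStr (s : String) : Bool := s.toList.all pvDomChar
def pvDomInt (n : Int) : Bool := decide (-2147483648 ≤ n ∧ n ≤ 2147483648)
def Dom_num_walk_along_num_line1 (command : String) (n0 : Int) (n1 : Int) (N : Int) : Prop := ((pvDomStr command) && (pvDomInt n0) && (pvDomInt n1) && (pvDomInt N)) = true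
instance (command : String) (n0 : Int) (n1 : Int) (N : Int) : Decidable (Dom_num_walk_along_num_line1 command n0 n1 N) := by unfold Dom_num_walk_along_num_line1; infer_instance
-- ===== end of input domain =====

-- B replaces A's exponential enumeration of all distinct subsequences by a one-pass
-- position-indexed distinct-subsequence DP with last-occurrence deduplication (objective: faster).

-- ===== PORT A =====
-- the 'pos' loop of Python is_reachable, pos made explicit
def pvReachGo (s : List Char) (pos : Int) (n1 : Int) (N : Int) : Bool :=
  match s with
  | [] => pos == n1
  | c :: cs =>
    if c == 'l' then
      if pos - 1 < 0 then false else pvReachGo cs (pos - 1) n1 N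
    else
      if pos + 1 > N then false else pvReachGo cs (pos + 1) n1 N

def is_reachable (s : List Char) (n0 : Int) (n1 : Int) (N : Int) : Bool :=
  pvReachGo s n0 n1 N

-- Python find_substr(command, substrs) fills an (initially empty) set; the port returns that set.
def find_substr : List Char → PySem.Set (List Char)
  | [] => PySem.Set.empty
  | c :: rest =>
    let temp := find_substr rest
    let substrs := temp.foldl (fun acc s => PySem.Set.add (PySem.Set.add acc s) (c :: s)) PySem.Set.empty
    PySem.Set.add substrs [c]

def num_walk_along_num_line1 (command : String) (n0 : Int) (n1 : Int) (N : Int) : Int :=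
  let substrs := find_substr command.toList
  substrs.foldl (fun count s => if is_reachable s n0 n1 N then count + 1 else count) 0

-- ===== PORT B =====
-- one step of Source B's loop body: state = (total, last)
def pvStepB (n0 : Int) (N : Int)
    (st : PySem.Dict Int Int × PySem.Dict Char (PySem.Dict Int Int)) (c : Char) :
    PySem.Dict Int Int × PySem.Dict Char (PySem.Dict Int Int) :=
  let total := st.1
  let last := st.2
  let delta : Int := if c == 'l' then -1 else 1
  let new_c := total.items.foldl
    (fun acc pc =>
      if (if delta == -1 then pc.1 + delta < 0 else pc.1 + delta > N) then acc
      else acc.insert (pc.1 + delta) (acc.getD (pc.1 + delta) 0 + pc.2))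
    PySem.Dict.empty
  let q0 := n0 + delta
  let new_c := if ¬ (if delta == -1 then q0 < 0 else q0 > N)
               then new_c.insert q0 (new_c.getD q0 0 + 1) else new_c
  let old_c := last.getD c PySem.Dict.empty
  let total := new_c.items.foldl (fun t pc => t.insert pc.1 (t.getD pc.1 0 + pc.2)) total
  let total := old_c.items.foldl (fun t pc => t.insert pc.1 (t.getD pc.1 0 - pc.2)) total
  (total, last.insert c new_c)

def num_walk_along_num_line1_alt (command : String) (n0 : Int) (n1 : Int) (N : Int) : Int :=
  let st := command.toList.foldl (pvStepB n0 N) (PySem.Dict.empty, PySem.Dict.empty)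
  st.1.getD n1 0

-- ===== PRECONDITION & SPEC =====
def Spec_num_walk_along_num_line1 (command : String) (n0 : Int) (n1 : Int) (N : Int) (out : Int) : Prop := out = num_walk_along_num_line1_alt command n0 n1 N
instance (command : String) (n0 : Int) (n1 : Int) (N : Int) (out : Int) : Decidable (Spec_num_walk_along_num_line1 command n0 n1 N out) := by unfold Spec_num_walk_along_num_line1; infer_instance

-- ===== CLAIM (what is proved, stated in full; the proofs are below) =====
def Claim_equal_num_walk_along_num_line1 : Prop := ∀ (command : String) (n0 : Int) (n1 : Int) (N : Int), Dom_num_walk_along_num_line1 command n0 n1 N → Spec_num_walk_along_num_line1 command n0 n1 N (num_walk_along_num_line1 command n0 n1 N)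

-- ===== LEMMAS AND PROOFS =====

-- mathematical walk: end position of a legal walk, none if it ever leaves the range
def pvWalk (N : Int) : List Char → Int → Option Int
  | [], pos => some pos
  | c :: cs, pos =>
    if c = 'l' then
      if pos - 1 < 0 then none else pvWalk N cs (pos - 1)
    else
      if pos + 1 > N then none else pvWalk N cs (pos + 1)

theorem pvReachGo_eq_walk (s : List Char) (pos n1 N : Int) :
    pvReachGo s pos n1 N = decide (pvWalk N s pos = some n1) := by
  induction s generalizing pos with
  | nil => by_cases h : pos = n1 <;> simp [pvReachGo, pvWalk, h]
  | cons c cs ih =>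
    simp only [pvReachGo, pvWalk, beq_iff_eq]
    split_ifs <;> simp [ih]

theorem pvWalk_snoc (N : Int) (t : List Char) (c : Char) (pos : Int) :
    pvWalk N (t ++ [c]) pos = (pvWalk N t pos).bind (fun p =>
      if c = 'l' then (if p - 1 < 0 then none else some (p - 1))
      else (if p + 1 > N then none else some (p + 1))) := by
  induction t generalizing pos with
  | nil => simp [pvWalk]
  | cons d ds ih =>
    simp only [List.cons_append, pvWalk]
    split_ifs <;> first | rfl | (rw [ih]; simp_all)

-- all sublists (subsequences) of xs, as a Finset (includes [])
def pvSubs (xs : List Char) : Finset (List Char) := xs.sublists.toFinset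

theorem mem_pvSubs (xs s : List Char) : s ∈ pvSubs xs ↔ s.Sublist xs := by
  simp [pvSubs]

-- counts: distinct nonempty legal subsequences ending at p (pvF), those ending in char c (pvG)
def pvF (n0 N : Int) (xs : List Char) (p : Int) : ℕ :=
  ((pvSubs xs).filter (fun s => s ≠ [] ∧ pvWalk N s n0 = some p)).card
def pvG (n0 N : Int) (xs : List Char) (c : Char) (p : Int) : ℕ :=
  ((pvSubs xs).filter (fun s => pvWalk N s n0 = some p ∧ s.getLast? = some c)).card

-- ---- A side ----

theorem pvMemFold2 (c : Char) (l : List (List Char)) (acc : PySem.Set (List Char)) (y : List Char) :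
    y ∈ l.foldl (fun acc s => PySem.Set.add (PySem.Set.add acc s) (c :: s)) acc ↔
      y ∈ acc ∨ ∃ s ∈ l, y = s ∨ y = c :: s := by
  induction l generalizing acc with
  | nil => simp
  | cons s l ih =>
    simp only [List.foldl_cons, ih, PySem.Set.mem_add, List.mem_cons]
    constructor
    · rintro (((h | rfl) | rfl) | ⟨t, ht, h⟩)
      · exact Or.inl h
      · exact Or.inr ⟨y, Or.inl rfl, Or.inl rfl⟩
      · exact Or.inr ⟨s, Or.inl rfl, Or.inr rfl⟩
      · exact Or.inr ⟨t, Or.inr ht, h⟩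
    · rintro (h | ⟨t, (rfl | ht), h⟩)
      · exact Or.inl (Or.inl (Or.inl h))
      · rcases h with rfl | rfl
        · exact Or.inl (Or.inl (Or.inr rfl))
        · exact Or.inl (Or.inr rfl)
      · exact Or.inr ⟨t, ht, h⟩

theorem pvNodupFold2 (c : Char) (l : List (List Char)) (acc : PySem.Set (List Char))
    (h : acc.Nodup) :
    (l.foldl (fun acc s => PySem.Set.add (PySem.Set.add acc s) (c :: s)) acc).Nodup := by
  induction l generalizing acc with
  | nil => simpa using h
  | cons s l ih => exact ih _ (PySem.Set.nodup_add _ _ (PySem.Set.nodup_add _ _ h))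

theorem find_substr_mem (xs : List Char) : ∀ (s : List Char),
    s ∈ find_substr xs ↔ s ≠ [] ∧ s.Sublist xs := by
  induction xs with
  | nil =>
    intro s
    simp only [find_substr, PySem.Set.empty]
    constructor
    · intro h; cases h
    · rintro ⟨hne, hsub⟩; cases List.sublist_nil.mp hsub; exact absurd rfl hne
  | cons c rest ih =>
    intro s
    simp only [find_substr, PySem.Set.mem_add, pvMemFold2, List.sublist_cons_iff]
    constructor
    · rintro ((h | ⟨t, ht, (rfl | rfl)⟩) | rfl)
      · cases h
      · rcases (ih s).mp ht with ⟨hne, hsub⟩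
        exact ⟨hne, Or.inl hsub⟩
      · rcases (ih t).mp ht with ⟨_, hsub⟩
        exact ⟨by simp, Or.inr ⟨t, rfl, hsub⟩⟩
      · exact ⟨by simp, Or.inr ⟨[], rfl, List.nil_sublist rest⟩⟩
    · rintro ⟨hne, h | ⟨r, rfl, hr⟩⟩
      · exact Or.inl (Or.inr ⟨s, (ih s).mpr ⟨hne, h⟩, Or.inl rfl⟩)
      · by_cases hrn : r = []
        · subst hrn; exact Or.inr rfl
        · exact Or.inl (Or.inr ⟨r, (ih r).mpr ⟨hrn, hr⟩, Or.inr rfl⟩)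

theorem find_substr_nodup (xs : List Char) : (find_substr xs).Nodup := by
  induction xs with
  | nil => exact List.nodup_nil
  | cons c rest ih =>
    exact PySem.Set.nodup_add _ _ (pvNodupFold2 c _ _ List.nodup_nil)

theorem countA (n0 n1 N : Int) (l : List (List Char)) (k : Int) :
    l.foldl (fun count s => if is_reachable s n0 n1 N then count + 1 else count) k
      = k + l.countP (fun s => is_reachable s n0 n1 N) := by
  induction l generalizing k with
  | nil => simp
  | cons s l ih => by_cases h : is_reachable s n0 n1 N <;> simp [h, ih] <;> ring

theorem A_eq_F (command : String) (n0 n1 N : Int) :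
    num_walk_along_num_line1 command n0 n1 N = (pvF n0 N command.toList n1 : Int) := by
  unfold num_walk_along_num_line1
  rw [countA, zero_add]
  congr 1
  have hnd := find_substr_nodup command.toList
  rw [List.countP_eq_length_filter, ← List.toFinset_card_of_nodup (hnd.filter _),
      List.toFinset_filter]
  unfold pvF
  congr 1
  apply Finset.ext
  intro s
  simp only [Finset.mem_filter, List.mem_toFinset, find_substr_mem, mem_pvSubs,
    is_reachable, pvReachGo_eq_walk, decide_eq_true_eq]
  tauto

-- ---- combinatorial step lemmas ----

theorem pvSubs_snoc_mem (xs : List Char) (c : Char) (s : List Char) :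
    s ∈ pvSubs (xs ++ [c]) ↔ s.Sublist xs ∨ ∃ t, t.Sublist xs ∧ s = t ++ [c] := by
  rw [mem_pvSubs, List.sublist_append_iff]
  constructor
  · rintro ⟨l1, l2, rfl, h1, h2⟩
    rcases List.sublist_singleton.mp h2 with rfl | rfl
    · exact Or.inl (by simpa using h1)
    · exact Or.inr ⟨l1, h1, rfl⟩
  · rintro (h | ⟨t, ht, rfl⟩)
    · exact ⟨s, [], by simp, h, List.nil_sublist _⟩
    · exact ⟨t, [c], rfl, ht, List.Sublist.refl _⟩

theorem pvMem_snoc_not_last (xs : List Char) (c : Char) (s : List Char)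
    (hlast : s.getLast? ≠ some c) :
    s ∈ pvSubs (xs ++ [c]) ↔ s ∈ pvSubs xs := by
  rw [pvSubs_snoc_mem, mem_pvSubs]
  constructor
  · rintro (h | ⟨t, ht, rfl⟩)
    · exact h
    · exact absurd List.getLast?_concat hlast
  · exact Or.inl

theorem pvWalk_snoc_eq (N : Int) (t : List Char) (c : Char) (n0 p : Int) :
    (pvWalk N (t ++ [c]) n0 = some p) ↔
      (¬ (if c = 'l' then p < 0 else p > N)) ∧
      pvWalk N t n0 = some (p - (if c = 'l' then (-1 : Int) else 1)) := by
  rw [pvWalk_snoc]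
  cases h : pvWalk N t n0 with
  | none => simp
  | some k => split_ifs <;> simp <;> omega

theorem pvEnds_eq_image (n0 N : Int) (xs : List Char) (c : Char) (p : Int) :
    (pvSubs (xs ++ [c])).filter (fun s => pvWalk N s n0 = some p ∧ s.getLast? = some c)
      = ((pvSubs xs).filter (fun t => pvWalk N (t ++ [c]) n0 = some p)).image (· ++ [c]) := by
  apply Finset.ext
  intro s
  simp only [Finset.mem_filter, Finset.mem_image, mem_pvSubs]
  constructor
  · rintro ⟨hmem, hwalk, hlast⟩
    rcases List.getLast?_eq_some_iff.mp hlast with ⟨t, rfl⟩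
    refine ⟨t, ⟨?_, hwalk⟩, rfl⟩
    rcases (pvSubs_snoc_mem xs c (t ++ [c])).mp ((mem_pvSubs _ _).mpr hmem) with h | ⟨t', ht', he⟩
    · exact (List.sublist_append_left t [c]).trans h
    · obtain rfl : t' = t := (List.append_left_injective [c] he.symm)
      exact ht'
  · rintro ⟨t, ⟨hsub, hwalk⟩, rfl⟩
    refine ⟨?_, hwalk, List.getLast?_concat⟩
    exact List.Sublist.append hsub (List.Sublist.refl [c])

theorem pvF0 (n0 N : Int) (xs : List Char) (k : Int) :
    ((pvSubs xs).filter (fun t => pvWalk N t n0 = some k)).card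
      = pvF n0 N xs k + (if k = n0 then 1 else 0) := by
  classical
  by_cases hk : k = n0
  · rw [hk]
    have hset : (pvSubs xs).filter (fun t => pvWalk N t n0 = some n0)
        = insert [] ((pvSubs xs).filter (fun s => s ≠ [] ∧ pvWalk N s n0 = some n0)) := by
      apply Finset.ext
      intro t
      simp only [Finset.mem_insert, Finset.mem_filter, mem_pvSubs]
      constructor
      · rintro ⟨hmem, hwalk⟩
        by_cases ht : t = []
        · exact Or.inl ht
        · exact Or.inr ⟨hmem, ht, hwalk⟩
      · rintro (rfl | ⟨hmem, hne, hwalk⟩)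
        · exact ⟨List.nil_sublist xs, rfl⟩
        · exact ⟨hmem, hwalk⟩
    rw [hset, Finset.card_insert_of_notMem (by simp)]
    simp [pvF]
  · have hset : (pvSubs xs).filter (fun t => pvWalk N t n0 = some k)
        = (pvSubs xs).filter (fun s => s ≠ [] ∧ pvWalk N s n0 = some k) := by
      apply Finset.ext
      intro t
      simp only [Finset.mem_filter]
      constructor
      · rintro ⟨hmem, hwalk⟩
        refine ⟨hmem, ?_, hwalk⟩
        rintro rfl
        simp [pvWalk] at hwalk
        exact hk hwalk.symm
      · rintro ⟨hmem, _, hwalk⟩; exact ⟨hmem, hwalk⟩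
    rw [hset]
    simp [pvF, hk]

theorem G_snoc_self (n0 N : Int) (xs : List Char) (c : Char) (p : Int) :
    pvG n0 N (xs ++ [c]) c p =
      (if (if c = 'l' then p < 0 else p > N) then 0
       else pvF n0 N xs (p - (if c = 'l' then -1 else 1)) +
            (if p - (if c = 'l' then -1 else 1) = n0 then 1 else 0)) := by
  classical
  unfold pvG
  rw [pvEnds_eq_image, Finset.card_image_of_injective _ (List.append_left_injective [c])]
  have hcong : (pvSubs xs).filter (fun t => pvWalk N (t ++ [c]) n0 = some p)
      = (pvSubs xs).filter (fun t => (¬ (if c = 'l' then p < 0 else p > N)) ∧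
          pvWalk N t n0 = some (p - (if c = 'l' then (-1 : Int) else 1))) := by
    apply Finset.filter_congr
    intro t _
    exact pvWalk_snoc_eq N t c n0 p
  rw [hcong]
  by_cases hb : (if c = 'l' then p < 0 else p > N)
  · simp [hb]
  · simp only [hb, not_false_iff, true_and, if_false]
    exact pvF0 n0 N xs _

theorem G_snoc_ne (n0 N : Int) (xs : List Char) (c c' : Char) (hne : c' ≠ c) (p : Int) :
    pvG n0 N (xs ++ [c]) c' p = pvG n0 N xs c' p := by
  unfold pvG
  congr 1
  apply Finset.ext
  intro s
  simp only [Finset.mem_filter]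
  constructor
  · rintro ⟨hmem, hwalk, hlast⟩
    refine ⟨?_, hwalk, hlast⟩
    rw [← pvMem_snoc_not_last xs c s (by rw [hlast]; simp [hne])]
    exact hmem
  · rintro ⟨hmem, hwalk, hlast⟩
    refine ⟨?_, hwalk, hlast⟩
    rw [pvMem_snoc_not_last xs c s (by rw [hlast]; simp [hne])]
    exact hmem

theorem F_split (n0 N : Int) (ys : List Char) (c : Char) (p : Int) :
    pvF n0 N ys p
      = ((pvSubs ys).filter (fun s => s ≠ [] ∧ pvWalk N s n0 = some p ∧ s.getLast? ≠ some c)).card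
        + pvG n0 N ys c p := by
  classical
  unfold pvF pvG
  have h := Finset.card_filter_add_card_filter_not
      (s := (pvSubs ys).filter (fun s => s ≠ [] ∧ pvWalk N s n0 = some p))
      (fun s => s.getLast? = some c)
  have h1 : ((pvSubs ys).filter (fun s => s ≠ [] ∧ pvWalk N s n0 = some p)).filter
        (fun s => s.getLast? = some c)
      = (pvSubs ys).filter (fun s => pvWalk N s n0 = some p ∧ s.getLast? = some c) := by
    rw [Finset.filter_filter]
    apply Finset.filter_congr
    intro s _
    constructor
    · rintro ⟨⟨_, hwalk⟩, hlast⟩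
      exact ⟨hwalk, hlast⟩
    · rintro ⟨hwalk, hlast⟩
      rcases List.getLast?_eq_some_iff.mp hlast with ⟨t, rfl⟩
      exact ⟨⟨by simp, hwalk⟩, hlast⟩
  have h2 : ((pvSubs ys).filter (fun s => s ≠ [] ∧ pvWalk N s n0 = some p)).filter
        (fun s => ¬ s.getLast? = some c)
      = (pvSubs ys).filter (fun s => s ≠ [] ∧ pvWalk N s n0 = some p ∧ s.getLast? ≠ some c) := by
    rw [Finset.filter_filter]
    apply Finset.filter_congr
    intro s _
    tauto
  rw [h1, h2] at h
  omega

theorem F_snoc (n0 N : Int) (xs : List Char) (c : Char) (p : Int) :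
    pvF n0 N (xs ++ [c]) p + pvG n0 N xs c p = pvF n0 N xs p + pvG n0 N (xs ++ [c]) c p := by
  classical
  have hA : ((pvSubs (xs ++ [c])).filter
        (fun s => s ≠ [] ∧ pvWalk N s n0 = some p ∧ s.getLast? ≠ some c)).card
      = ((pvSubs xs).filter
        (fun s => s ≠ [] ∧ pvWalk N s n0 = some p ∧ s.getLast? ≠ some c)).card := by
    congr 1
    apply Finset.ext
    intro s
    simp only [Finset.mem_filter]
    constructor
    · rintro ⟨hmem, hne, hwalk, hlast⟩
      exact ⟨(pvMem_snoc_not_last xs c s hlast).mp hmem, hne, hwalk, hlast⟩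
    · rintro ⟨hmem, hne, hwalk, hlast⟩
      exact ⟨(pvMem_snoc_not_last xs c s hlast).mpr hmem, hne, hwalk, hlast⟩
  rw [F_split n0 N (xs ++ [c]) c p, F_split n0 N xs c p, hA]
  omega

-- ---- B side: dict loop lemmas ----

def pvKeySum (l : List (Int × Int)) (k : Int) : Int :=
  ((l.filter (fun pc => pc.1 = k)).map (·.2)).sum

theorem pvKeySum_nil (k : Int) : pvKeySum [] k = 0 := rfl

theorem pvKeySum_cons (pc : Int × Int) (l : List (Int × Int)) (k : Int) :
    pvKeySum (pc :: l) k = (if pc.1 = k then pc.2 else 0) + pvKeySum l k := by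
  unfold pvKeySum
  rw [List.filter_cons]
  split_ifs with h <;> simp_all

theorem pvKeySum_eq_zero (l : List (Int × Int)) (k : Int) (h : k ∉ l.map Prod.fst) :
    pvKeySum l k = 0 := by
  induction l with
  | nil => rfl
  | cons pc l ih =>
    rw [pvKeySum_cons]
    simp only [List.map_cons, List.mem_cons] at h
    push_neg at h
    rw [if_neg (fun he => h.1 he.symm), ih h.2, add_zero]

theorem pvKeySum_getD (pairs : List (Int × Int)) (hnd : (pairs.map Prod.fst).Nodup) (k : Int) :
    pvKeySum pairs k = (PySem.Dict.mk pairs).getD k 0 := by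
  induction pairs with
  | nil => rfl
  | cons pc l ih =>
    rw [pvKeySum_cons, PySem.Dict.getD_eq_get?_getD]
    rcases pc with ⟨k0, v0⟩
    rw [PySem.Dict.get?_mk_cons]
    simp only [List.map_cons, List.nodup_cons] at hnd
    by_cases h : k0 = k
    · subst h
      rw [if_pos rfl, if_pos (by simp), pvKeySum_eq_zero l k0 hnd.1, add_zero]
      rfl
    · rw [if_neg h, if_neg (by simpa using h), zero_add, ih hnd.2,
        PySem.Dict.getD_eq_get?_getD]

theorem pvKeySum_items (d : PySem.Dict Int Int) (hnd : d.keys.Nodup) (k : Int) :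
    pvKeySum d.items k = d.getD k 0 :=
  pvKeySum_getD d.items hnd k

theorem pvD1 (δ N : Int) (l : List (Int × Int)) (acc : PySem.Dict Int Int) (q : Int) :
    (l.foldl (fun acc pc =>
        if (if δ == -1 then pc.1 + δ < 0 else pc.1 + δ > N) then acc
        else acc.insert (pc.1 + δ) (acc.getD (pc.1 + δ) 0 + pc.2)) acc).getD q 0
      = acc.getD q 0 + (if (if δ == -1 then q < 0 else q > N) then 0 else pvKeySum l (q - δ)) := by
  induction l generalizing acc with
  | nil => simp [pvKeySum_nil]
  | cons pc l ih =>
    rw [List.foldl_cons, ih]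
    by_cases hc : (if δ == -1 then pc.1 + δ < 0 else pc.1 + δ > N)
    · rw [if_pos hc]
      by_cases hb : (if δ == -1 then q < 0 else q > N)
      · rw [if_pos hb, if_pos hb]
      · rw [if_neg hb, if_neg hb, pvKeySum_cons, if_neg ?_]
        · ring
        · intro h
          have he : pc.1 + δ = q := by omega
          exact hb (he ▸ hc)
    · rw [if_neg hc, PySem.Dict.getD_insert]
      by_cases he : q = pc.1 + δ
      · have hb : ¬ (if δ == -1 then q < 0 else q > N) := by rw [he]; exact hc
        rw [if_pos he, if_neg hb, if_neg hb, pvKeySum_cons, if_pos (by omega), ← he]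
        ring
      · rw [if_neg he]
        by_cases hb : (if δ == -1 then q < 0 else q > N)
        · rw [if_pos hb, if_pos hb]
        · rw [if_neg hb, if_neg hb, pvKeySum_cons, if_neg (by omega)]
          ring

theorem pvD2 (l : List (Int × Int)) (t : PySem.Dict Int Int) (q : Int) :
    (l.foldl (fun t pc => t.insert pc.1 (t.getD pc.1 0 + pc.2)) t).getD q 0
      = t.getD q 0 + pvKeySum l q := by
  induction l generalizing t with
  | nil => simp [pvKeySum_nil]
  | cons pc l ih =>
    rw [List.foldl_cons, ih, PySem.Dict.getD_insert, pvKeySum_cons]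
    by_cases he : q = pc.1
    · rw [if_pos he, if_pos (by omega), he]
      ring
    · rw [if_neg he, if_neg (by omega)]
      ring

theorem pvD3 (l : List (Int × Int)) (t : PySem.Dict Int Int) (q : Int) :
    (l.foldl (fun t pc => t.insert pc.1 (t.getD pc.1 0 - pc.2)) t).getD q 0
      = t.getD q 0 - pvKeySum l q := by
  induction l generalizing t with
  | nil => simp [pvKeySum_nil]
  | cons pc l ih =>
    rw [List.foldl_cons, ih, PySem.Dict.getD_insert, pvKeySum_cons]
    by_cases he : q = pc.1
    · rw [if_pos he, if_pos (by omega), he]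
      ring
    · rw [if_neg he, if_neg (by omega)]
      ring

theorem pvNodupFold {α : Type} (f : PySem.Dict Int Int → α → PySem.Dict Int Int)
    (hf : ∀ d x, d.keys.Nodup → (f d x).keys.Nodup) :
    ∀ (l : List α) (d : PySem.Dict Int Int), d.keys.Nodup → (l.foldl f d).keys.Nodup := by
  intro l
  induction l with
  | nil => intro d h; simpa using h
  | cons x l ih => intro d h; exact ih _ (hf d x h)

-- the invariant carried through B's loop
def pvInv (n0 N : Int) (xs : List Char)
    (st : PySem.Dict Int Int × PySem.Dict Char (PySem.Dict Int Int)) : Prop :=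
  st.1.keys.Nodup ∧
  (∀ c, ((st.2.getD c PySem.Dict.empty).keys).Nodup) ∧
  (∀ p, st.1.getD p 0 = (pvF n0 N xs p : Int)) ∧
  (∀ c p, (st.2.getD c PySem.Dict.empty).getD p 0 = (pvG n0 N xs c p : Int))

theorem pvInv_init (n0 N : Int) : pvInv n0 N [] (PySem.Dict.empty, PySem.Dict.empty) := by
  refine ⟨PySem.Dict.nodup_keys_empty, ?_, ?_, ?_⟩
  · intro c
    rw [PySem.Dict.getD_empty]
    exact PySem.Dict.nodup_keys_empty
  · intro p
    rw [PySem.Dict.getD_empty]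
    simp [pvF, pvSubs]
  · intro c p
    rw [PySem.Dict.getD_empty, PySem.Dict.getD_empty]
    simp [pvG, pvSubs, Finset.filter_singleton]

-- proof-side names for the dictionaries built inside pvStepB
def pvDelta (c : Char) : Int := if c == 'l' then -1 else 1

def pvNC0 (N : Int) (total : PySem.Dict Int Int) (c : Char) : PySem.Dict Int Int :=
  total.items.foldl
    (fun acc pc =>
      if (if pvDelta c == -1 then pc.1 + pvDelta c < 0 else pc.1 + pvDelta c > N) then acc
      else acc.insert (pc.1 + pvDelta c) (acc.getD (pc.1 + pvDelta c) 0 + pc.2))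
    PySem.Dict.empty

def pvNC (n0 N : Int) (total : PySem.Dict Int Int) (c : Char) : PySem.Dict Int Int :=
  if ¬ (if pvDelta c == -1 then n0 + pvDelta c < 0 else n0 + pvDelta c > N)
  then (pvNC0 N total c).insert (n0 + pvDelta c) ((pvNC0 N total c).getD (n0 + pvDelta c) 0 + 1)
  else pvNC0 N total c

theorem pvStepB_fst (n0 N : Int) (st : PySem.Dict Int Int × PySem.Dict Char (PySem.Dict Int Int))
    (c : Char) :
    (pvStepB n0 N st c).1
      = (st.2.getD c PySem.Dict.empty).items.foldl
          (fun t pc => t.insert pc.1 (t.getD pc.1 0 - pc.2))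
          ((pvNC n0 N st.1 c).items.foldl
            (fun t pc => t.insert pc.1 (t.getD pc.1 0 + pc.2)) st.1) := rfl

theorem pvStepB_snd (n0 N : Int) (st : PySem.Dict Int Int × PySem.Dict Char (PySem.Dict Int Int))
    (c : Char) :
    (pvStepB n0 N st c).2 = st.2.insert c (pvNC n0 N st.1 c) := rfl

theorem pvNC0_nodup (N : Int) (total : PySem.Dict Int Int) (c : Char) :
    (pvNC0 N total c).keys.Nodup := by
  unfold pvNC0
  refine pvNodupFold _ (fun d x hd => ?_) _ _ PySem.Dict.nodup_keys_empty
  by_cases hh : (if pvDelta c == -1 then x.1 + pvDelta c < 0 else x.1 + pvDelta c > N)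
  · rw [if_pos hh]
    exact hd
  · rw [if_neg hh]
    exact PySem.Dict.nodup_keys_insert _ _ _ hd

theorem pvNC_nodup (n0 N : Int) (total : PySem.Dict Int Int) (c : Char) :
    (pvNC n0 N total c).keys.Nodup := by
  unfold pvNC
  by_cases h0 : ¬ (if pvDelta c == -1 then n0 + pvDelta c < 0 else n0 + pvDelta c > N)
  · rw [if_pos h0]
    exact PySem.Dict.nodup_keys_insert _ _ _ (pvNC0_nodup N total c)
  · rw [if_neg h0]
    exact pvNC0_nodup N total c

theorem pvNC0_getD (N : Int) (total : PySem.Dict Int Int) (c : Char) (hnd : total.keys.Nodup)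
    (q : Int) :
    (pvNC0 N total c).getD q 0
      = if (if pvDelta c == -1 then q < 0 else q > N) then 0
        else total.getD (q - pvDelta c) 0 := by
  unfold pvNC0
  rw [pvD1, pvKeySum_items total hnd, PySem.Dict.getD_empty, zero_add]

theorem pvNC_getD (n0 N : Int) (total : PySem.Dict Int Int) (c : Char) (hnd : total.keys.Nodup)
    (q : Int) :
    (pvNC n0 N total c).getD q 0
      = if (if pvDelta c == -1 then q < 0 else q > N) then 0
        else total.getD (q - pvDelta c) 0 + (if q - pvDelta c = n0 then 1 else 0) := by
  unfold pvNC
  by_cases h0 : ¬ (if pvDelta c == -1 then n0 + pvDelta c < 0 else n0 + pvDelta c > N)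
  · rw [if_pos h0, PySem.Dict.getD_insert]
    by_cases he : q = n0 + pvDelta c
    · have hbq : ¬ (if pvDelta c == -1 then q < 0 else q > N) := by rw [he]; exact h0
      have hqd : q - pvDelta c = n0 := by omega
      rw [if_pos he, if_neg hbq, hqd, if_pos rfl, pvNC0_getD N total c hnd, if_neg h0]
      have harg : n0 + pvDelta c - pvDelta c = n0 := by ring
      rw [harg]
    · rw [if_neg he, pvNC0_getD N total c hnd]
      by_cases hb : (if pvDelta c == -1 then q < 0 else q > N)
      · rw [if_pos hb, if_pos hb]
      · rw [if_neg hb, if_neg hb, if_neg (by omega), add_zero]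
  · rw [if_neg h0, pvNC0_getD N total c hnd]
    have hb0 := not_not.mp h0
    by_cases hb : (if pvDelta c == -1 then q < 0 else q > N)
    · rw [if_pos hb, if_pos hb]
    · rw [if_neg hb, if_neg hb, if_neg ?_, add_zero]
      intro hqd
      have he : q = n0 + pvDelta c := by omega
      rw [he] at hb
      exact hb hb0

theorem pvInv_step (n0 N : Int) (xs : List Char) (c : Char) (st) (h : pvInv n0 N xs st) :
    pvInv n0 N (xs ++ [c]) (pvStepB n0 N st c) := by
  obtain ⟨hnd, hndl, hF, hG⟩ := h
  have hbadIff : ∀ q : Int,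
      (if pvDelta c == -1 then q < 0 else q > N) ↔ (if c = 'l' then q < 0 else q > N) := by
    intro q
    by_cases hcl : c = 'l' <;> simp [pvDelta, hcl]
  have hdeltaEq : pvDelta c = if c = 'l' then -1 else 1 := by
    by_cases hcl : c = 'l' <;> simp [pvDelta, hcl]
  -- the freshly built dict counts the subsequences of xs ++ [c] that end in c
  have hncG : ∀ q, (pvNC n0 N st.1 c).getD q 0 = (pvG n0 N (xs ++ [c]) c q : Int) := by
    intro q
    rw [pvNC_getD n0 N st.1 c hnd q, G_snoc_self]
    by_cases hb : (if c = 'l' then q < 0 else q > N)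
    · rw [if_pos ((hbadIff q).mpr hb), if_pos hb]
      simp
    · rw [if_neg (fun hx => hb ((hbadIff q).mp hx)), if_neg hb, hF, hdeltaEq]
      push_cast
      ring
  have hT : ∀ p, (pvStepB n0 N st c).1.getD p 0 = (pvF n0 N (xs ++ [c]) p : Int) := by
    intro p
    rw [pvStepB_fst, pvD3, pvD2, pvKeySum_items _ (pvNC_nodup n0 N st.1 c),
        pvKeySum_items _ (hndl c), hF, hG, hncG]
    have hs := F_snoc n0 N xs c p
    omega
  refine ⟨?_, ?_, hT, ?_⟩
  · rw [pvStepB_fst]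
    refine pvNodupFold _ (fun d x hd => PySem.Dict.nodup_keys_insert _ _ _ hd) _ _ ?_
    exact pvNodupFold _ (fun d x hd => PySem.Dict.nodup_keys_insert _ _ _ hd) _ _ hnd
  · intro c'
    rw [pvStepB_snd, PySem.Dict.getD_insert]
    by_cases hc' : c' = c
    · rw [if_pos hc']
      exact pvNC_nodup n0 N st.1 c
    · rw [if_neg hc']
      exact hndl c'
  · intro c' p
    rw [pvStepB_snd, PySem.Dict.getD_insert]
    by_cases hc' : c' = c
    · rw [if_pos hc', hc', hncG]
    · rw [if_neg hc', hG, G_snoc_ne n0 N xs c c' hc' p]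

theorem pvInv_foldl (n0 N : Int) (xs : List Char) :
    pvInv n0 N xs (xs.foldl (pvStepB n0 N) (PySem.Dict.empty, PySem.Dict.empty)) := by
  induction xs using List.reverseRecOn with
  | nil => exact pvInv_init n0 N
  | append_singleton xs c ih =>
    rw [List.foldl_append]
    exact pvInv_step n0 N xs c _ ih

theorem B_eq_F (command : String) (n0 n1 N : Int) :
    num_walk_along_num_line1_alt command n0 n1 N = (pvF n0 N command.toList n1 : Int) := by
  have h := pvInv_foldl n0 N command.toList
  exact h.2.2.1 n1

-- ===== VERDICT (by name: the statement is the Claim_ definition above) =====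
theorem num_walk_along_num_line1_spec : Claim_equal_num_walk_along_num_line1 := by
  intro command n0 n1 N _
  unfold Spec_num_walk_along_num_line1
  rw [A_eq_F, B_eq_F]
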